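-- pv_equiv track=rewrite | github.com/iman48HK/CIA | backend/app/routers/ai.py | _assistant_reply_after_user_message
-- ===== SOURCE A (Python) =====
-- def _normalize_chat_text(s: str) -> str:
--     return " ".join(s.strip().split())
--
-- def _assistant_reply_after_user_message(chat_history: list[dict], user_text: str) -> str:
--     """Return the assistant message immediately following the first matching user turn."""
--     target = user_text.strip()
--     target_norm = _normalize_chat_text(user_text)
--     n = len(chat_history)
--     for i, row in enumerate(chat_history):
--         if str(row.get("role", "")).lower() != "user":
--             continue
--         ut = str(row.get("text", "")).strip()
--         if ut != target and _normalize_chat_text(ut) != target_norm: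
--             continue
--         for j in range(i + 1, n):
--             role = str(chat_history[j].get("role", "")).lower()
--             if role == "assistant":
--                 return str(chat_history[j].get("text", "")).strip()
--             if role == "user":
--                 break
--     return "No assistant reply appears after this message in the exported transcript."
-- ===== SOURCE B (Python) =====
-- def _normalize_chat_text(s: str) -> str:
--     return " ".join(s.strip().split())
--
-- def _assistant_reply_after_user_message(chat_history: list[dict], user_text: str) -> str:
--     """Single linear pass: `armed` records whether the most recent user turn matched."""
--     target = user_text.strip()
--     target_norm = _normalize_chat_text(user_text)
--     armed = False
--     for row in chat_history:
--         role = str(row.get("role", "")).lower()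
--         if role == "user":
--             ut = str(row.get("text", "")).strip()
--             armed = (ut == target or _normalize_chat_text(ut) == target_norm)
--         elif role == "assistant" and armed:
--             return str(row.get("text", "")).strip()
--     return "No assistant reply appears after this message in the exported transcript."
-- ===== Notes on version B (the rewrite author's own statement) =====
-- stated objective: simpler
-- what changed: Replaced A's nested find-then-rescan (outer enumerate plus inner index loop over range(i+1,n)) with one linear pass maintaining a boolean state flag `armed` that records whether the most recent user turn matched, returning at the first armed assistant row.
import Mathlib
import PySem

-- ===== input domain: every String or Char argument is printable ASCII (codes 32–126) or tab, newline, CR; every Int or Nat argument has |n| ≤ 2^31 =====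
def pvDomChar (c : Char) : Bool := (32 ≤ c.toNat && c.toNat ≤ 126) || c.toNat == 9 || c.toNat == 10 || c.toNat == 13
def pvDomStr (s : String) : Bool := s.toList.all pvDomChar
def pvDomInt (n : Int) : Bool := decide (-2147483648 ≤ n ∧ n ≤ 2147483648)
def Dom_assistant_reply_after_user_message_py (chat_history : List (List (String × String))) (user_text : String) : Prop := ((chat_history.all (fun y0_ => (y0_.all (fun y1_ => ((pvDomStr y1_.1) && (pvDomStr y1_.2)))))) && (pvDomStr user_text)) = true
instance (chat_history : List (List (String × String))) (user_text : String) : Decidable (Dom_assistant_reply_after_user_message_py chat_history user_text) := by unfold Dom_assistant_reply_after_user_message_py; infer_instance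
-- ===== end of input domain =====

-- B replaces A's nested find-then-rescan with one linear pass over the history
-- carrying a boolean `armed` flag; objective: simpler.

-- ===== PORT A =====
-- shared helpers (straight from the Python module): _normalize_chat_text, the
-- default sentinel, and the str(row.get(k,"")) field reads (str() on a str is identity)
def pvNorm (s : String) : String :=
  PySem.Str.join " " (PySem.Str.split₀ (PySem.Str.strip s))

def pvNoReply : String :=
  "No assistant reply appears after this message in the exported transcript."

def pvRole (row : List (String × String)) : String :=
  PySem.Str.lower ((PySem.Dict.mk row).getD "role" "")

def pvText (row : List (String × String)) : String :=
  PySem.Str.strip ((PySem.Dict.mk row).getD "text" "")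

-- A's inner loop 'for j in range(i+1, n)': scan the suffix, return the first
-- assistant text (some) or break at the first user row / end of list (none)
def pvInnerA : List (List (String × String)) → Option String
  | [] => none
  | row :: rest =>
    if pvRole row = "assistant" then some (pvText row)
    else if pvRole row = "user" then none
    else pvInnerA rest

-- A's outer 'for i, row in enumerate(chat_history)' loop
def pvOuterA (target tnorm : String) : List (List (String × String)) → Option String
  | [] => none
  | row :: rest =>
    if pvRole row ≠ "user" then pvOuterA target tnorm rest
    else
      if pvText row ≠ target ∧ pvNorm (pvText row) ≠ tnorm then pvOuterA target tnorm rest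
      else
        match pvInnerA rest with
        | some t => some t
        | none => pvOuterA target tnorm rest

def assistant_reply_after_user_message_py (chat_history : List (List (String × String))) (user_text : String) : String :=
  (pvOuterA (PySem.Str.strip user_text) (pvNorm user_text) chat_history).getD pvNoReply

-- ===== PORT B =====
-- one pass; `armed` = the most recent user row matched the target
def pvLoopB (target tnorm : String) (armed : Bool) : List (List (String × String)) → String
  | [] => pvNoReply
  | row :: rest =>
    if pvRole row = "user" then
      pvLoopB target tnorm (pvText row == target || pvNorm (pvText row) == tnorm) rest
    else if pvRole row = "assistant" && armed then pvText row
    else pvLoopB target tnorm armed rest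

def assistant_reply_after_user_message_py_alt (chat_history : List (List (String × String))) (user_text : String) : String :=
  pvLoopB (PySem.Str.strip user_text) (pvNorm user_text) false chat_history

-- ===== PRECONDITION & SPEC =====
def Spec_assistant_reply_after_user_message_py (chat_history : List (List (String × String))) (user_text : String) (out : String) : Prop := out = assistant_reply_after_user_message_py_alt chat_history user_text
instance (chat_history : List (List (String × String))) (user_text : String) (out : String) : Decidable (Spec_assistant_reply_after_user_message_py chat_history user_text out) := by unfold Spec_assistant_reply_after_user_message_py; infer_instance

-- ===== CLAIM (what is proved, stated in full; the proofs are below) =====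
def Claim_equal_assistant_reply_after_user_message_py : Prop := ∀ (chat_history : List (List (String × String))) (user_text : String), Dom_assistant_reply_after_user_message_py chat_history user_text → Spec_assistant_reply_after_user_message_py chat_history user_text (assistant_reply_after_user_message_py chat_history user_text)

-- ===== LEMMAS AND PROOFS =====
-- Invariant: with `armed = false` B's loop computes A's outer loop (defaulted);
-- with `armed = true` it computes A's inner scan, falling back to the outer loop.
set_option maxHeartbeats 1000000 in
theorem pvLoopB_eq (target tnorm : String) :
    ∀ rows : List (List (String × String)),
      pvLoopB target tnorm false rows = (pvOuterA target tnorm rows).getD pvNoReply ∧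
      pvLoopB target tnorm true rows =
        (match pvInnerA rows with
         | some t => t
         | none => (pvOuterA target tnorm rows).getD pvNoReply) := by
  intro rows
  induction rows with
  | nil => simp [pvLoopB, pvOuterA, pvInnerA]
  | cons row rest ih =>
    obtain ⟨ihF, ihT⟩ := ih
    by_cases hu : pvRole row = "user"
    · have hna : pvRole row ≠ "assistant" := by rw [hu]; decide
      by_cases hm : pvText row = target ∨ pvNorm (pvText row) = tnorm
      · -- the user row matches: B arms, A enters the inner scan
        have harm : (pvText row == target || pvNorm (pvText row) == tnorm) = true := by
          rcases hm with h | h <;> simp [h]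
        have hnc : ¬ (pvText row ≠ target ∧ pvNorm (pvText row) ≠ tnorm) :=
          fun hc => hm.elim (fun h1 => hc.1 h1) (fun h2 => hc.2 h2)
        constructor <;>
          · cases hin : pvInnerA rest <;>
              simp [pvLoopB, pvOuterA, pvInnerA, hu, harm, hnc, hin, ihT]
      · -- the user row does not match: B disarms, A continues the outer loop
        rw [not_or] at hm
        have harm : (pvText row == target || pvNorm (pvText row) == tnorm) = false := by
          simp [hm.1, hm.2]
        constructor <;>
          simp [pvLoopB, pvOuterA, pvInnerA, hu, harm, hm.1, hm.2, ihF]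
    · by_cases ha : pvRole row = "assistant"
      · constructor
        · simp [pvLoopB, pvOuterA, hu, ha, ihF]
        · simp [pvLoopB, pvInnerA, ha]
      · constructor
        · simp [pvLoopB, pvOuterA, hu, ha, ihF]
        · simp [pvLoopB, pvOuterA, pvInnerA, hu, ha, ihT]

-- ===== VERDICT (by name: the statement is the Claim_ definition above) =====
theorem assistant_reply_after_user_message_py_spec : Claim_equal_assistant_reply_after_user_message_py := by
  intro chat_history user_text _
  unfold Spec_assistant_reply_after_user_message_py
  unfold assistant_reply_after_user_message_py assistant_reply_after_user_message_py_alt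
  exact ((pvLoopB_eq (PySem.Str.strip user_text) (pvNorm user_text) chat_history).1).symm
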